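-- pv_equiv track=rewrite | github.com/urbandecay/rCAD_utils | rCAD_utils/vertex_resampler/operators/bridged_open_loop_with_corners_attached_case.py | _attached_split_infos_by_kind
-- ===== SOURCE A (Python) =====
-- def _attached_split_infos_by_kind(split_infos):
--     section_split_infos = [
--         split_info for split_info in split_infos
--         if split_info.get('split_kind') == 'section'
--     ]
--     boundary_split_infos = [
--         split_info for split_info in split_infos
--         if split_info.get('split_kind') == 'boundary'
--     ]
--     return section_split_infos, boundary_split_infos
-- ===== SOURCE B (Python) =====
-- def _attached_split_infos_by_kind(split_infos):
--     # Group-by: build one hash index from split_kind to the infos of that kind,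
--     # then select the two kinds of interest by lookup.
--     groups = {}
--     for split_info in split_infos:
--         groups.setdefault(split_info.get('split_kind'), []).append(split_info)
--     return groups.get('section', []), groups.get('boundary', [])
-- ===== Notes on version B (the rewrite author's own statement) =====
-- stated objective: alternative
-- what changed: B replaces A's two filtering comprehensions with a generic group-by: one pass builds a hash index from split_kind to its list of infos, and the result is two dictionary lookups ('section', 'boundary'), so no per-kind scan of split_infos exists at all.
import Mathlib
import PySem

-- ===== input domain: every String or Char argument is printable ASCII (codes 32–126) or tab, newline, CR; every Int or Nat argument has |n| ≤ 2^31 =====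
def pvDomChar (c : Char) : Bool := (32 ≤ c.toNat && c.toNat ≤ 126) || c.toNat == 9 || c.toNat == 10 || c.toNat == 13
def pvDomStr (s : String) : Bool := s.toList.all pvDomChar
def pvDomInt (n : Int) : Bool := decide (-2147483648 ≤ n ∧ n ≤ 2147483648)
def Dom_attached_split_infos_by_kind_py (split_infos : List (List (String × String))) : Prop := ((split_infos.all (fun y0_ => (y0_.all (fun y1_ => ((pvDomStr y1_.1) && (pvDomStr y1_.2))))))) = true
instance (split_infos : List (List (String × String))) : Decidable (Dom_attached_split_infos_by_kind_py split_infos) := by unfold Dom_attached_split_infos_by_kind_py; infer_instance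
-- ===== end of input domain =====

-- B: a generic group-by — one pass builds a dict from split_kind to its infos, then two lookups — instead of A's two filtering comprehensions (alternative decomposition; same result).
-- ===== PORT A =====
def attached_split_infos_by_kind_py (split_infos : List (List (String × String))) : (List (List (String × String))) × (List (List (String × String))) :=
  (split_infos.filter (fun split_info => (PySem.Dict.mk split_info).get? "split_kind" == some "section"),
   split_infos.filter (fun split_info => (PySem.Dict.mk split_info).get? "split_kind" == some "boundary"))

-- ===== PORT B =====
-- groups.setdefault(k, []).append(x)  ≡  insert k (getD k [] ++ [x])  (overwrite keeps position; new key appends — matches Python)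
def attached_split_infos_by_kind_py_alt (split_infos : List (List (String × String))) : (List (List (String × String))) × (List (List (String × String))) :=
  let groups : PySem.Dict (Option String) (List (List (String × String))) :=
    split_infos.foldl (fun groups split_info =>
      let k := (PySem.Dict.mk split_info).get? "split_kind"
      groups.insert k (groups.getD k [] ++ [split_info])) PySem.Dict.empty
  (groups.getD (some "section") [], groups.getD (some "boundary") [])

-- ===== PRECONDITION & SPEC =====
def Spec_attached_split_infos_by_kind_py (split_infos : List (List (String × String))) (out : (List (List (String × String))) × (List (List (String × String)))) : Prop := out = attached_split_infos_by_kind_py_alt split_infos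
instance (split_infos : List (List (String × String))) (out : (List (List (String × String))) × (List (List (String × String)))) : Decidable (Spec_attached_split_infos_by_kind_py split_infos out) := by unfold Spec_attached_split_infos_by_kind_py; infer_instance

-- ===== CLAIM =====
def Claim_equal_attached_split_infos_by_kind_py : Prop := ∀ (split_infos : List (List (String × String))), Dom_attached_split_infos_by_kind_py split_infos → Spec_attached_split_infos_by_kind_py split_infos (attached_split_infos_by_kind_py split_infos)

-- ===== LEMMAS AND PROOFS =====
-- Invariant: after folding, the list stored under any key k is the start value ++ the infos whose split_kind lookup equals k.
theorem pv_groups_getD (xs : List (List (String × String)))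
    (d : PySem.Dict (Option String) (List (List (String × String))))
    (k : Option String) :
    (xs.foldl (fun groups split_info =>
      let kk := (PySem.Dict.mk split_info).get? "split_kind"
      groups.insert kk (groups.getD kk [] ++ [split_info])) d).getD k []
    = d.getD k [] ++ xs.filter (fun x => (PySem.Dict.mk x).get? "split_kind" == k) := by
  induction xs generalizing d with
  | nil => simp
  | cons x xs ih =>
    simp only [List.foldl_cons, List.filter_cons]
    rw [ih]
    by_cases h : (PySem.Dict.mk x).get? "split_kind" = k
    · simp [h, PySem.Dict.getD_insert_self]
    · have h' : ¬ ((PySem.Dict.mk x).get? "split_kind" == k) = true := by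
        simpa using h
      rw [PySem.Dict.getD_insert_of_ne (hne := fun hk => h hk.symm)]
      simp [h']

-- ===== VERDICT =====
theorem attached_split_infos_by_kind_py_spec : Claim_equal_attached_split_infos_by_kind_py := by
  intro split_infos _
  unfold Spec_attached_split_infos_by_kind_py attached_split_infos_by_kind_py attached_split_infos_by_kind_py_alt
  simp only [pv_groups_getD, PySem.Dict.getD_empty, List.nil_append]
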